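-- pv_equiv track=rewrite | github.com/karockai/Yongorithm | DP/등굣길.py | col1
-- ===== SOURCE A (Python) =====
-- def col1(aMap):
--     puddle = False
--     for r in range(1,len(aMap)):
--         if (puddle):
--             aMap[r][0] = 0
--             continue
--         if (aMap[r][0] == -1):
--             aMap[r][0] = 0
--             puddle = True
--         else:
--             aMap[r][0] = 1
--     return aMap
-- ===== SOURCE B (Python) =====
-- def col1(aMap):
--     # Locate-then-fill: find the first puddle row in column 0, then fill
--     # ones above it and zeros from it down. Mutates aMap in place like A.
--     n = len(aMap)
--     puddle_row = n
--     for r in range(1, n):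
--         if aMap[r][0] == -1:
--             puddle_row = r
--             break
--     for r in range(1, puddle_row):
--         aMap[r][0] = 1
--     for r in range(puddle_row, n):
--         aMap[r][0] = 0
--     return aMap
-- ===== Notes on version B (the rewrite author's own statement) =====
-- stated objective: alternative
-- what changed: A's single latched pass (a boolean 'puddle' flag carried through one loop) is replaced by a locate-then-fill decomposition: one scan finds the first puddle row in column 0, then two plain fill loops write 1s above it and 0s from it down.
import Mathlib
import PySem

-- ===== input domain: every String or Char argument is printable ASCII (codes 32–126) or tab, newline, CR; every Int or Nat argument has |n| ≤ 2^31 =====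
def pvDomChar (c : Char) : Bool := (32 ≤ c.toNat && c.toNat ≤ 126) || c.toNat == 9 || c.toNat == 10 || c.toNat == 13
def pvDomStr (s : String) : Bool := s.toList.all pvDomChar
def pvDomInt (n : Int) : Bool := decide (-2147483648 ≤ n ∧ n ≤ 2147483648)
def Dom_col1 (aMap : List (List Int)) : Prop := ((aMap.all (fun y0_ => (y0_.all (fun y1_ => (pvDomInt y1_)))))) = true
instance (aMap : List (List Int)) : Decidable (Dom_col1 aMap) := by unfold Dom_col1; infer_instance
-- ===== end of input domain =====

-- B replaces A's latched single pass by a locate-then-fill two-phase decomposition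
-- (alternative, same cost); both Pythons mutate aMap in place, the equivalence proved
-- here is about the returned value.

-- shared helper: the statement 'aMap[r][0] = v' (total via defaults; exact where the
-- accessed row exists and is nonempty, which Pre_col1 guarantees for every r both loops visit)
def setRow0 (m : List (List Int)) (r v : Int) : List (List Int) :=
  PySem.List.pySetD m r (PySem.List.pySetD (PySem.List.pyGetD m r []) 0 v)

-- shared helper: the expression 'aMap[r][0]' (exact under Pre_col1, as above)
def readAt (m : List (List Int)) (r : Int) : Int :=
  PySem.List.pyGetD (PySem.List.pyGetD m r []) 0 0

-- ===== PORT A =====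
def col1 (aMap : List (List Int)) : List (List Int) :=
  ((PySem.List.pyRange 1 (PySem.List.len aMap) 1).foldl
    (fun (st : List (List Int) × Bool) r =>
      if st.2 then (setRow0 st.1 r 0, true)
      else if readAt st.1 r = -1 then (setRow0 st.1 r 0, true)
      else (setRow0 st.1 r 1, false))
    (aMap, false)).1

-- ===== PORT B =====
-- B's first loop with its break: first r in rs with aMap[r][0] == -1, else the default
def findPuddle (m : List (List Int)) (rs : List Int) (dflt : Int) : Int :=
  match rs with
  | [] => dflt
  | r :: rest => if readAt m r = -1 then r else findPuddle m rest dflt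

def col1_alt (aMap : List (List Int)) : List (List Int) :=
  let n := PySem.List.len aMap
  let p := findPuddle aMap (PySem.List.pyRange 1 n 1) n
  let m1 := (PySem.List.pyRange 1 p 1).foldl (fun m r => setRow0 m r 1) aMap
  (PySem.List.pyRange p n 1).foldl (fun m r => setRow0 m r 0) m1

-- ===== PRECONDITION & SPEC =====
-- Pre_ excludes inputs where some row other than row 0 is empty: there Python A (and B)
-- raise IndexError on 'aMap[r][0]'.
def Pre_col1 (aMap : List (List Int)) : Prop := ∀ row ∈ aMap.tail, row ≠ []
instance (aMap : List (List Int)) : Decidable (Pre_col1 aMap) := by unfold Pre_col1; infer_instance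

def pvWitness_col1 : List (List Int) := [[0, 0], [0, 1], [-1, 0], [3, 2]]

def Spec_col1 (aMap : List (List Int)) (out : List (List Int)) : Prop := out = col1_alt aMap
instance (aMap : List (List Int)) (out : List (List Int)) : Decidable (Spec_col1 aMap out) := by unfold Spec_col1; infer_instance

-- ===== CLAIM (what is proved, stated in full; the proofs are below) =====
def Claim_equal_col1 : Prop := ∀ (aMap : List (List Int)), Dom_col1 aMap → Pre_col1 aMap → Spec_col1 aMap (col1 aMap)

-- ===== LEMMAS AND PROOFS =====

-- writing row r does not change what is read at any other row r'
theorem readAt_setRow0_ne (m : List (List Int)) (r r' v : Int)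
    (hr : 0 ≤ r) (hr' : 0 ≤ r') (hne : r ≠ r') :
    readAt (setRow0 m r v) r' = readAt m r' := by
  simp only [readAt, setRow0, PySem.List.pyGetD]
  rw [PySem.List.pySetD_of_nonneg _ _ hr,
      PySem.List.pyGet?_of_nonneg _ hr',
      PySem.List.pyGet?_of_nonneg _ hr',
      List.getElem?_set_ne (by omega : r.toNat ≠ r'.toNat)]

-- once the 'puddle' flag is latched, A's loop is exactly B's zero-fill loop
theorem foldA_true (rs : List Int) (m : List (List Int)) :
    ((rs.foldl
      (fun (st : List (List Int) × Bool) r =>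
        if st.2 then (setRow0 st.1 r 0, true)
        else if readAt st.1 r = -1 then (setRow0 st.1 r 0, true)
        else (setRow0 st.1 r 1, false))
      (m, true)).1) = rs.foldl (fun m r => setRow0 m r 0) m := by
  induction rs generalizing m with
  | nil => rfl
  | cons r rest ih => simp only [List.foldl_cons]; exact ih _

theorem findPuddle_mem_or (m : List (List Int)) (rs : List Int) (dflt : Int) :
    findPuddle m rs dflt ∈ rs ∨ findPuddle m rs dflt = dflt := by
  induction rs with
  | nil => simp [findPuddle]
  | cons r rest ih =>
    simp only [findPuddle]
    split
    · simp
    · rcases ih with h | h <;> simp [h]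

-- the loop invariant: A's pass from row a onward, on any m that still reads like aMap
-- there, equals B's ones-then-zeros fill split at the first puddle row of the suffix
theorem foldA_main_aux (aMap : List (List Int)) (b : Int) :
    ∀ (k : Nat) (a : Int) (m : List (List Int)), (b - a).toNat ≤ k → 1 ≤ a →
    (∀ r, a ≤ r → r < b → readAt m r = readAt aMap r) →
    ((PySem.List.pyRange a b 1).foldl
      (fun (st : List (List Int) × Bool) r =>
        if st.2 then (setRow0 st.1 r 0, true)
        else if readAt st.1 r = -1 then (setRow0 st.1 r 0, true)
        else (setRow0 st.1 r 1, false))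
      (m, false)).1 =
    (PySem.List.pyRange (findPuddle aMap (PySem.List.pyRange a b 1) b) b 1).foldl
      (fun m r => setRow0 m r 0)
      ((PySem.List.pyRange a (findPuddle aMap (PySem.List.pyRange a b 1) b) 1).foldl
        (fun m r => setRow0 m r 1) m) := by
  intro k
  induction k with
  | zero =>
    intro a m hk ha hread
    have hba : b ≤ a := by omega
    simp [PySem.List.pyRange_one_eq_nil hba, findPuddle,
      PySem.List.pyRange_one_eq_nil (le_refl b)]
  | succ k ih =>
    intro a m hk ha hread
    by_cases hab : a < b
    · rw [PySem.List.pyRange_one_cons hab]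
      simp only [List.foldl_cons, findPuddle]
      by_cases hp : readAt aMap a = -1
      · have hm : readAt m a = -1 := by rw [hread a le_rfl hab]; exact hp
        simp only [hm, hp, if_true, Bool.false_eq_true, if_false]
        rw [foldA_true]
        rw [PySem.List.pyRange_one_eq_nil (le_refl a), PySem.List.pyRange_one_cons hab]
        simp
      · have hm : ¬ (readAt m a = -1) := by rw [hread a le_rfl hab]; exact hp
        simp only [hm, hp, Bool.false_eq_true, if_false]
        have hread' : ∀ r, a + 1 ≤ r → r < b → readAt (setRow0 m a 1) r = readAt aMap r := by
          intro r h1 h2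
          rw [readAt_setRow0_ne m a r 1 (by omega) (by omega) (by omega)]
          exact hread r (by omega) h2
        rw [ih (a + 1) (setRow0 m a 1) (by omega) (by omega) hread']
        have hpb : a + 1 ≤ findPuddle aMap (PySem.List.pyRange (a+1) b 1) b ∧
            findPuddle aMap (PySem.List.pyRange (a+1) b 1) b ≤ b := by
          rcases findPuddle_mem_or aMap (PySem.List.pyRange (a+1) b 1) b with h | h
          · rw [PySem.List.mem_pyRange_one] at h; omega
          · omega
        rw [PySem.List.pyRange_one_cons (show a < findPuddle aMap (PySem.List.pyRange (a+1) b 1) b by omega)]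
        simp
    · have hba : b ≤ a := by omega
      simp [PySem.List.pyRange_one_eq_nil hba, findPuddle,
        PySem.List.pyRange_one_eq_nil (le_refl b)]

-- ===== VERDICT (by name: the statement is the Claim_ definition above) =====
theorem col1_spec : Claim_equal_col1 := by
  intro aMap _ _
  show col1 aMap = col1_alt aMap
  simp only [col1, col1_alt]
  exact foldA_main_aux aMap (PySem.List.len aMap) ((PySem.List.len aMap) - 1).toNat 1 aMap
    le_rfl le_rfl (fun _ _ _ => rfl)
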